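-- pv_equiv track=rewrite | github.com/TheAxiomFoundation/rac-compile | src/rac_compile/compile_model.py | _combine_value_kinds
-- ===== SOURCE A (Python) =====
-- def _combine_value_kinds(kinds: list[str], fallback: str) -> str:
--     """Combine several value kinds into one conservative shared kind."""
--     unique = {kind for kind in kinds if kind}
--     if not unique:
--         return fallback
--     if len(unique) == 1:
--         return next(iter(unique))
--     if unique <= {"integer", "number"}:
--         return "number"
--     return fallback
-- ===== SOURCE B (Python) =====
-- # Single left-to-right fold over the kinds with a running combined state
-- # (EMPTY / BAIL sentinels) instead of building a set and inspecting it.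
-- _EMPTY = object()
-- _BAIL = object()
--
--
-- def _combine_value_kinds(kinds: list[str], fallback: str) -> str:
--     state = _EMPTY
--     for k in kinds:
--         if not k:
--             continue
--         if state is _EMPTY:
--             state = k
--         elif state is _BAIL:
--             pass
--         elif state == k:
--             pass
--         elif state in ("integer", "number") and k in ("integer", "number"):
--             state = "number"
--         else:
--             state = _BAIL
--     return fallback if state is _EMPTY or state is _BAIL else state
-- ===== Notes on version B (the rewrite author's own statement) =====
-- stated objective: alternative
-- what changed: Replaced the set-comprehension-then-inspect structure (build the set of distinct truthy kinds, then branch on emptiness/size/subset) with a single fold that maintains a running combined state with EMPTY and BAIL sentinels.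
import Mathlib
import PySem

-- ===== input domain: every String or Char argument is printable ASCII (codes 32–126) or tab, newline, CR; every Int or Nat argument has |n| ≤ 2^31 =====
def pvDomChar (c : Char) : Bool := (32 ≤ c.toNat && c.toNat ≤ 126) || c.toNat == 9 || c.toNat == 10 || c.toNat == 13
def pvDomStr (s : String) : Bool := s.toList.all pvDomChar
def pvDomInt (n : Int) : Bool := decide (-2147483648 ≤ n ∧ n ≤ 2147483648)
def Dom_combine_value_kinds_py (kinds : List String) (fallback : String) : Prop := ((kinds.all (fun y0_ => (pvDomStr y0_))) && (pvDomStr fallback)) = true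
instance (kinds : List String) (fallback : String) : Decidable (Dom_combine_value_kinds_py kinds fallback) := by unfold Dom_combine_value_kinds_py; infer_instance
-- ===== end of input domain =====

-- B replaces A's build-a-set-then-inspect structure by a single fold with a running combined state (alternative decomposition, same cost).

-- ===== PORT A =====
-- unique = {kind for kind in kinds if kind}
def cvkUnique (kinds : List String) : PySem.Set String :=
  kinds.foldl (fun s kind => if kind ≠ "" then PySem.Set.add s kind else s) PySem.Set.empty

def combine_value_kinds_py (kinds : List String) (fallback : String) : String :=
  let unique := cvkUnique kinds
  if unique = [] then fallback
  else if PySem.Set.len unique = 1 then unique.headD ""   -- next(iter(unique)): the single element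
  else if PySem.Set.issubset unique (PySem.Set.ofList ["integer", "number"]) then "number"
  else fallback

-- ===== PORT B =====
inductive CKState
  | empty : CKState
  | found : String → CKState
  | bail : CKState
deriving DecidableEq, Repr

def ckNumeric (s : String) : Bool := s == "integer" || s == "number"

def ckStep (st : CKState) (k : String) : CKState :=
  if k = "" then st
  else match st with
    | .empty => .found k
    | .bail => .bail
    | .found s =>
      if s = k then .found s
      else if ckNumeric s && ckNumeric k then .found "number"
      else .bail

def combine_value_kinds_py_alt (kinds : List String) (fallback : String) : String :=
  match kinds.foldl ckStep .empty with
  | .empty => fallback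
  | .found s => s
  | .bail => fallback

-- ===== PRECONDITION & SPEC =====
def Spec_combine_value_kinds_py (kinds : List String) (fallback : String) (out : String) : Prop := out = combine_value_kinds_py_alt kinds fallback
instance (kinds : List String) (fallback : String) (out : String) : Decidable (Spec_combine_value_kinds_py kinds fallback out) := by unfold Spec_combine_value_kinds_py; infer_instance

-- ===== CLAIM (what is proved, stated in full; the proofs are below) =====
def Claim_equal_combine_value_kinds_py : Prop := ∀ (kinds : List String) (fallback : String), Dom_combine_value_kinds_py kinds fallback → Spec_combine_value_kinds_py kinds fallback (combine_value_kinds_py kinds fallback)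

-- ===== LEMMAS AND PROOFS =====

-- Invariant relating A's accumulated set of distinct truthy kinds to B's running state.
def CKRel (u : List String) (st : CKState) : Prop :=
  match st with
  | .empty => u = []
  | .found s => u = [s] ∨ (2 ≤ u.length ∧ (∀ x ∈ u, x = "integer" ∨ x = "number") ∧ s = "number")
  | .bail => 2 ≤ u.length ∧ ∃ x ∈ u, ¬(x = "integer" ∨ x = "number")

lemma ckNumeric_iff (s : String) : ckNumeric s = true ↔ (s = "integer" ∨ s = "number") := by
  simp [ckNumeric]

lemma ckRel_step (u : List String) (st : CKState) (k : String) (h : CKRel u st) :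
    CKRel (if k ≠ "" then PySem.Set.add u k else u) (ckStep st k) := by
  by_cases hk : k = ""
  · simpa [ckStep, hk] using h
  · simp only [hk, ite_not, if_false, ckStep]
    cases st with
    | empty =>
      simp only [CKRel] at h ⊢
      subst h
      left; rfl
    | bail =>
      obtain ⟨hlen, x, hx, hnx⟩ := h
      refine ⟨?_, x, ?_, hnx⟩
      · calc 2 ≤ u.length := hlen
          _ ≤ (PySem.Set.add u k).length := by
              rw [PySem.Set.add_eq_ite]; split <;> simp
      · rw [PySem.Set.mem_add]; exact Or.inl hx
    | found s =>
      by_cases hsk : s = k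
      · subst hsk
        simp only [if_pos, CKRel] at h ⊢
        rcases h with h | ⟨hlen, hall, hs⟩
        · left; rw [h, PySem.Set.add_of_mem (by simp)]
        · right
          refine ⟨?_, ?_, hs⟩
          · calc 2 ≤ u.length := hlen
              _ ≤ (PySem.Set.add u s).length := by
                  rw [PySem.Set.add_eq_ite]; split <;> simp
          · intro x hx
            rw [PySem.Set.mem_add] at hx
            rcases hx with hx | hx
            · exact hall x hx
            · subst hx; subst hs; right; rfl
      · simp only [if_neg hsk]
        by_cases hnum : ckNumeric s && ckNumeric k
        · simp only [if_pos hnum, CKRel] at h ⊢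
          have hnum' := hnum
          rw [Bool.and_eq_true, ckNumeric_iff, ckNumeric_iff] at hnum'
          rcases h with h | ⟨hlen, hall, hs⟩
          · subst h
            right
            rw [PySem.Set.add_of_not_mem (by simp only [List.mem_singleton]; exact fun h => hsk h.symm)]
            refine ⟨by simp, ?_, trivial⟩
            intro x hx
            simp only [List.mem_append, List.mem_cons, List.not_mem_nil, or_false] at hx
            rcases hx with hx | hx
            · subst hx; exact hnum'.1
            · subst hx; exact hnum'.2
          · right
            refine ⟨?_, ?_, trivial⟩
            · calc 2 ≤ u.length := hlen
                _ ≤ (PySem.Set.add u k).length := by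
                    rw [PySem.Set.add_eq_ite]; split <;> simp
            · intro x hx
              rw [PySem.Set.mem_add] at hx
              rcases hx with hx | hx
              · exact hall x hx
              · subst hx
                rw [Bool.and_eq_true, ckNumeric_iff, ckNumeric_iff] at hnum
                exact hnum.2
        · simp only [if_neg hnum, CKRel] at h ⊢
          rw [Bool.and_eq_true, not_and_or] at hnum
          rcases h with h | ⟨hlen, hall, hs⟩
          · subst h
            rw [PySem.Set.add_of_not_mem (by simp only [List.mem_singleton]; exact fun h => hsk h.symm)]
            constructor
            · simp
            · rcases hnum with hn | hn
              · exact ⟨s, by simp, by rw [← ckNumeric_iff]; simpa using hn⟩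
              · exact ⟨k, by simp, by rw [← ckNumeric_iff]; simpa using hn⟩
          · -- here state was found "number" with all elements numeric, and k is non-numeric
            subst hs
            refine ⟨?_, k, ?_, ?_⟩
            · calc 2 ≤ u.length := hlen
                _ ≤ (PySem.Set.add u k).length := by
                    rw [PySem.Set.add_eq_ite]; split <;> simp
            · rw [PySem.Set.mem_add]; right; rfl
            · rcases hnum with hn | hn
              · exfalso; rw [ckNumeric_iff] at hn; exact hn (Or.inr rfl)
              · rw [← ckNumeric_iff]; simpa using hn

lemma ckRel_fold (kinds : List String) (u : List String) (st : CKState) (h : CKRel u st) :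
    CKRel (kinds.foldl (fun s kind => if kind ≠ "" then PySem.Set.add s kind else s) u)
          (kinds.foldl ckStep st) := by
  induction kinds generalizing u st with
  | nil => exact h
  | cons k ks ih =>
    simp only [List.foldl_cons]
    exact ih _ _ (ckRel_step u st k h)

-- ===== VERDICT (by name: the statement is the Claim_ definition above) =====
theorem combine_value_kinds_py_spec : Claim_equal_combine_value_kinds_py := by
  intro kinds fallback _
  unfold Spec_combine_value_kinds_py combine_value_kinds_py combine_value_kinds_py_alt cvkUnique
  have h := ckRel_fold kinds PySem.Set.empty .empty (by simp [CKRel, PySem.Set.empty])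
  set u := kinds.foldl (fun s kind => if kind ≠ "" then PySem.Set.add s kind else s) PySem.Set.empty with hu
  cases hst : kinds.foldl ckStep .empty with
  | empty =>
    rw [hst] at h
    simp only [CKRel] at h
    simp [h]
  | found s =>
    rw [hst] at h
    simp only [CKRel] at h
    rcases h with h | ⟨hlen, hall, hs⟩
    · simp [h, PySem.Set.len]
    · have hne : u ≠ [] := by intro he; rw [he] at hlen; simp at hlen
      have hlen1' : ¬ List.length u = 1 := by omega
      have hsub : PySem.Set.issubset u (PySem.Set.ofList ["integer", "number"]) = true := by
        rw [PySem.Set.issubset_iff]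
        intro x hx
        rcases hall x hx with h' | h' <;> simp [h', PySem.Set.ofList]
      simp [hne, hlen1', hsub, hs]
  | bail =>
    rw [hst] at h
    obtain ⟨hlen, x, hx, hnx⟩ := h
    have hne : u ≠ [] := by intro he; rw [he] at hx; simp at hx
    have hlen1' : ¬ List.length u = 1 := by omega
    have hsub : ¬ PySem.Set.issubset u (PySem.Set.ofList ["integer", "number"]) = true := by
      rw [PySem.Set.issubset_iff]
      push Not
      refine ⟨x, hx, ?_⟩
      rw [PySem.Set.mem_ofList]
      simpa using hnx
    simp [hne, hlen1', hsub]
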